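-- pv_equiv track=rewrite | github.com/JakubKazimierski/PythonPortfolio | Easy/ASCII_Conversion/ASCII_conversion.py | ASCII_conversion
-- ===== SOURCE A (Python) =====
-- def ASCII_conversion(strParam):
--     '''
--     Have the function ASCIIConversion(str)
--     take the str parameter being passed and
--     return a new string where every character,
--     aside from the space character, is replaced
--     with its corresponding decimal character code.
--     For example: if str is "dog" then your program
--     should return the string 100111103 because
--     d = 100, o = 111, g = 103.
--     '''
--
--     try:
--
--         words = strParam.split()
--         ascii_words = []
--
--         for word in words:
--             ascii_word = ""
--             for char in word:
--                 ascii_word += str(ord(char))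
--             ascii_words.append(ascii_word)
--
--         return " ".join(ascii_words)
--
--     except(AttributeError, TypeError):
--         return -1
-- ===== SOURCE B (Python) =====
-- def ASCII_conversion(strParam):
--     # Single pass with a pending-separator flag instead of split + nested loops.
--     try:
--         out = []
--         sep = []
--         for c in strParam:
--             if c.isspace():
--                 if out:
--                     sep = [" "]
--             else:
--                 out.extend(sep)
--                 sep = []
--                 out.append(str(ord(c)))
--         return "".join(out)
--     except (AttributeError, TypeError):
--         return -1
-- ===== Notes on version B (the rewrite author's own statement) =====
-- stated objective: simpler
-- what changed: Replaces split() plus nested word/char loops and a word list with a single pass over the characters maintaining an output buffer and a pending-separator flag.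
import Mathlib
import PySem

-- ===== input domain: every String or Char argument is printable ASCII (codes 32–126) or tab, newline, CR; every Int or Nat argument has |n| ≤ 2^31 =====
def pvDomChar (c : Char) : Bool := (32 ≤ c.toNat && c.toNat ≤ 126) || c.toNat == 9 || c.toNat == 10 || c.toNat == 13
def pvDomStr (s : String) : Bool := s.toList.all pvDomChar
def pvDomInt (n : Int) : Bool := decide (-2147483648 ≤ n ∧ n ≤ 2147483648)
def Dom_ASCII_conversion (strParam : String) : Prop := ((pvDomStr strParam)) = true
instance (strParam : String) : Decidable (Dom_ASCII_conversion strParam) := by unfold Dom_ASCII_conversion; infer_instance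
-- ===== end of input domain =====

-- B replaces split + nested word/char loops by one pass with a pending-separator state (objective: simpler decomposition, same cost).
-- On String inputs A's try/except never fires, so both ports are total; equivalence is proved on all of Dom.

-- ===== PORT A =====
def ASCII_conversion (strParam : String) : String :=
  let words := PySem.Chars.split₀ strParam.toList
  let asciiWords := words.foldl
    (fun aws w =>
      aws ++ [w.foldl (fun aw c => aw ++ PySem.Int.toChars (c.toNat : Int)) []])
    ([] : List (List Char))
  String.ofList (PySem.Chars.join [' '] asciiWords)

-- ===== PORT B =====
def ASCII_conversion_alt (strParam : String) : String :=
  let r := strParam.toList.foldl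
    (fun (st : List Char × List Char) c =>
      if PySem.Chars.isspace c then
        (st.1, if st.1.isEmpty then [] else [' '])
      else
        (st.1 ++ st.2 ++ PySem.Int.toChars (c.toNat : Int), []))
    (([] : List Char), ([] : List Char))
  String.ofList r.1

-- ===== PRECONDITION & SPEC =====
def Spec_ASCII_conversion (strParam : String) (out : String) : Prop := out = ASCII_conversion_alt strParam
instance (strParam : String) (out : String) : Decidable (Spec_ASCII_conversion strParam out) := by unfold Spec_ASCII_conversion; infer_instance

-- ===== CLAIM (what is proved, stated in full; the proofs are below) =====
def Claim_equal_ASCII_conversion : Prop := ∀ (strParam : String), Dom_ASCII_conversion strParam → Spec_ASCII_conversion strParam (ASCII_conversion strParam)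

-- ===== LEMMAS AND PROOFS =====

-- the per-character encoding str(ord(c)) and the per-word encoding
def pvEnc (c : Char) : List Char := PySem.Int.toChars (c.toNat : Int)
def pvEncW (w : List Char) : List Char := w.flatMap pvEnc

-- B's step function
def pvStep (st : List Char × List Char) (c : Char) : List Char × List Char :=
  if PySem.Chars.isspace c then
    (st.1, if st.1.isEmpty then [] else [' '])
  else
    (st.1 ++ st.2 ++ pvEnc c, [])

lemma pvEnc_ne_nil (c : Char) : pvEnc c ≠ [] := by
  simp only [pvEnc, PySem.Int.toChars]
  split
  · simp
  · exact List.ne_nil_of_length_pos Nat.length_toDigits_pos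

lemma pvEncW_ne_nil {w : List Char} (h : w ≠ []) : pvEncW w ≠ [] := by
  cases w with
  | nil => exact absurd rfl h
  | cons c w =>
    simp only [pvEncW, List.flatMap_cons]
    intro hnil
    exact pvEnc_ne_nil c (List.append_eq_nil_iff.mp hnil).1

-- join over a snoc
lemma pv_join_snoc (xs : List (List Char)) (y : List Char) :
    PySem.Chars.join [' '] (xs ++ [y]) =
      PySem.Chars.join [' '] xs ++ (if xs = [] then [] else [' ']) ++ y := by
  induction xs with
  | nil => simp [PySem.Chars.join_singleton, PySem.Chars.join_nil]
  | cons x rest ih =>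
    cases rest with
    | nil => simp [PySem.Chars.join_cons_cons, PySem.Chars.join_singleton]
    | cons z zs =>
      have h1 : (x :: z :: zs) ++ [y] = x :: ((z :: zs) ++ [y]) := by simp
      have h2 : x :: ((z :: zs) ++ [y]) = x :: z :: (zs ++ [y]) := by simp
      rw [h1, h2, PySem.Chars.join_cons_cons]
      have h3 : z :: (zs ++ [y]) = (z :: zs) ++ [y] := by simp
      rw [h3, ih, PySem.Chars.join_cons_cons]
      simp

-- the joined encoding of the accumulated (reversed) words
def pvC (acc : List (List Char)) : List Char :=
  PySem.Chars.join [' '] (acc.reverse.map pvEncW)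

def pvSep (acc : List (List Char)) : List Char := if acc = [] then [] else [' ']

lemma pvC_snoc (acc : List (List Char)) (w : List Char) :
    pvC (w :: acc) = pvC acc ++ pvSep acc ++ pvEncW w := by
  simp only [pvC, pvSep, List.reverse_cons, List.map_append, List.map_cons, List.map_nil,
    pv_join_snoc]
  simp

lemma pvC_empty_iff {acc : List (List Char)} (hne : ∀ w ∈ acc, w ≠ []) :
    pvC acc = [] ↔ acc = [] := by
  cases acc with
  | nil => simp [pvC]
  | cons w rest =>
    constructor
    · intro h
      exfalso
      have : pvC (w :: rest) = pvC rest ++ pvSep rest ++ pvEncW w := pvC_snoc rest w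
      rw [this] at h
      have := pvEncW_ne_nil (hne w (List.mem_cons_self))
      simp_all
    · intro h; exact absurd h (by simp)

-- the bridging invariant: running B's fold from a state that encodes split₀.go's state
-- produces exactly the join-of-encoded-words that split₀.go yields.
lemma pv_bridge (cs : List Char) :
    (∀ acc : List (List Char), (∀ w ∈ acc, w ≠ []) →
      (cs.foldl pvStep (pvC acc, pvSep acc)).1 =
        PySem.Chars.join [' '] ((PySem.Chars.split₀.go cs [] acc).map pvEncW)) ∧
    (∀ (cur : List Char) (acc : List (List Char)), cur ≠ [] → (∀ w ∈ acc, w ≠ []) →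
      (cs.foldl pvStep (pvC acc ++ pvSep acc ++ pvEncW cur.reverse, [])).1 =
        PySem.Chars.join [' '] ((PySem.Chars.split₀.go cs cur acc).map pvEncW)) := by
  induction cs with
  | nil =>
    constructor
    · intro acc _
      simp [PySem.Chars.split₀.go, pvC]
    · intro cur acc hcur _
      simp only [List.foldl_nil, PySem.Chars.split₀.go, List.isEmpty_iff, hcur,
        List.reverse_cons]
      rw [← pvC_snoc]
      simp [pvC]
  | cons c rest ih =>
    constructor
    · intro acc hne
      by_cases hs : PySem.Chars.isspace c = true
      · simp only [List.foldl_cons, pvStep, hs, if_pos, PySem.Chars.split₀.go,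
          List.isEmpty_nil]
        have : (if (pvC acc).isEmpty then ([] : List Char) else [' ']) = pvSep acc := by
          simp only [List.isEmpty_iff, pvC_empty_iff hne, pvSep]
        rw [this]
        exact ih.1 acc hne
      · simp only [List.foldl_cons, pvStep, hs, if_neg, Bool.false_eq_true,
          not_false_eq_true, PySem.Chars.split₀.go]
        have h2 := ih.2 [c] acc (by simp) hne
        simpa [pvEncW, pvEnc] using h2
    · intro cur acc hcur hne
      by_cases hs : PySem.Chars.isspace c = true
      · have hA : pvC acc ++ pvSep acc ++ pvEncW cur.reverse ≠ [] := by
          have := pvEncW_ne_nil (w := cur.reverse) (by simpa using hcur)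
          simp_all
        simp only [List.foldl_cons, pvStep, hs, if_pos, List.isEmpty_iff, hA,
          PySem.Chars.split₀.go, hcur]
        have hne' : ∀ w ∈ cur.reverse :: acc, w ≠ [] := by
          intro w hw
          rcases List.mem_cons.mp hw with h | h
          · subst h; simpa using hcur
          · exact hne w h
        have h1 := ih.1 (cur.reverse :: acc) hne'
        rw [pvC_snoc] at h1
        have hsep : pvSep (cur.reverse :: acc) = [' '] := by simp [pvSep]
        rw [hsep] at h1
        simpa [List.isEmpty_iff, hcur] using h1
      · simp only [List.foldl_cons, pvStep, hs, if_neg, Bool.false_eq_true,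
          not_false_eq_true, PySem.Chars.split₀.go]
        have h2 := ih.2 (c :: cur) acc (by simp) hne
        simp only [List.reverse_cons, pvEncW, List.flatMap_append, List.flatMap_cons,
          List.flatMap_nil, List.append_nil] at h2 ⊢
        simpa [List.append_assoc] using h2

-- ===== VERDICT (by name: the statement is the Claim_ definition above) =====
theorem ASCII_conversion_spec : Claim_equal_ASCII_conversion := by
  intro s _
  unfold Spec_ASCII_conversion ASCII_conversion ASCII_conversion_alt
  simp only [PySem.List.foldl_append_singleton_eq_map, List.nil_append]
  have hb := (pv_bridge s.toList).1 [] (by simp)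
  have hstep : ∀ (st : List Char × List Char) (c : Char),
      (if PySem.Chars.isspace c then
        (st.1, if st.1.isEmpty then ([] : List Char) else [' '])
      else
        (st.1 ++ st.2 ++ PySem.Int.toChars ((c.toNat : Int)), [])) = pvStep st c := by
    intro st c; simp [pvStep, pvEnc]
  simp only [hstep]
  have hC : pvC [] = ([] : List Char) := by simp [pvC]
  have hS : pvSep [] = ([] : List Char) := by simp [pvSep]
  rw [hC, hS] at hb
  rw [hb]
  have hfun : List.foldl (fun aw c => aw ++ PySem.Int.toChars ((c.toNat : Int))) ([] : List Char) = pvEncW := by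
    funext w
    rw [PySem.List.foldl_append_eq_flatMap]
    simp only [List.nil_append, pvEncW]
    rfl
  unfold PySem.Chars.split₀
  rw [hfun]
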